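-- pv_equiv track=rewrite | github.com/AdelBashiroff/11zadachek | Task_9.py | contains_substring
-- ===== SOURCE A (Python) =====
-- def to_lower_char(c):
--     if 'A' <= c <= 'Z':
--         return chr(ord(c) + 32)
--     return c
--
-- def contains_substring(line, sub):
--     n = len(line)
--     m = len(sub)
--     for i in range(n - m + 1):
--         match = True
--         for j in range(m):
--             if to_lower_char(line[i + j]) != to_lower_char(sub[j]):
--                 match = False
--                 break
--         if match:
--             return True
--     return False
-- ===== SOURCE B (Python) =====
-- def contains_substring(line, sub):
--     return sub.lower() in line.lower()
-- ===== Notes on version B (the rewrite author's own statement) =====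
-- stated objective: faster
-- what changed: Replaces the hand-written nested index loops with lowercasing both strings once and using Python's built-in substring membership test.
import Mathlib
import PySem

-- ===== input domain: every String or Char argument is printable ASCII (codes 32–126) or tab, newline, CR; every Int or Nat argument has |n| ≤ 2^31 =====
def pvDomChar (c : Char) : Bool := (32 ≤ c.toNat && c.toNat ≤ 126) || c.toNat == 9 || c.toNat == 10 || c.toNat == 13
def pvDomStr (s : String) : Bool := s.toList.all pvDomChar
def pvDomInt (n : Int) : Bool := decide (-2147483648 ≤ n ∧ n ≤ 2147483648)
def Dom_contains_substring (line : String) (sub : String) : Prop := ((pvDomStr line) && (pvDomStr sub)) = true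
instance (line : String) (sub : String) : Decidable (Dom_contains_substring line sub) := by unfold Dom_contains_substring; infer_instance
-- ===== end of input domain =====

-- B lowercases both strings once and uses the built-in substring test instead of A's nested index loops.
-- (Python's str.lower agrees with A's to_lower_char on the ASCII input domain.)


-- ===== PORT A =====
-- to_lower_char
def toLowerCharA (c : Char) : Char :=
  if 'A' ≤ c ∧ c ≤ 'Z' then Char.ofNat (c.toNat + 32) else c

-- inner 'for j in range(m)' loop with its break/early exit; indices are always in
-- range when called by aOuter, so the pyGetD default ' ' is never read.
def aInner (line sub : List Char) (i : Int) : List Int → Bool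
  | [] => true
  | j :: js =>
      if toLowerCharA (PySem.List.pyGetD line (i + j) ' ') ≠ toLowerCharA (PySem.List.pyGetD sub j ' ')
      then false
      else aInner line sub i js

-- outer 'for i in range(n - m + 1)' loop with the early 'return True'
def aOuter (line sub : List Char) : List Int → Bool
  | [] => false
  | i :: is =>
      if aInner line sub i (PySem.List.pyRange 0 (sub.length : Int)) then true
      else aOuter line sub is

def contains_substring (line : String) (sub : String) : Bool :=
  aOuter line.toList sub.toList
    (PySem.List.pyRange 0 (PySem.Str.len line - PySem.Str.len sub + 1))

-- ===== PORT B =====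
def contains_substring_alt (line : String) (sub : String) : Bool :=
  PySem.Str.isIn (PySem.Str.lower sub) (PySem.Str.lower line)

-- ===== PRECONDITION & SPEC =====
def Spec_contains_substring (line : String) (sub : String) (out : Bool) : Prop := out = contains_substring_alt line sub
instance (line : String) (sub : String) (out : Bool) : Decidable (Spec_contains_substring line sub out) := by unfold Spec_contains_substring; infer_instance

-- ===== CLAIM (what is proved, stated in full; the proofs are below) =====
def Claim_equal_contains_substring : Prop := ∀ (line : String) (sub : String), Dom_contains_substring line sub → Spec_contains_substring line sub (contains_substring line sub)

-- ===== LEMMAS AND PROOFS =====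

theorem toLowerCharA_eq (c : Char) : toLowerCharA c = PySem.Chars.lowerChar c := by
  simp [toLowerCharA, PySem.Chars.lowerChar, PySem.Chars.isupper]

theorem aInner_eq_all (line sub : List Char) (i : Int) (js : List Int) :
    aInner line sub i js =
      js.all (fun j => toLowerCharA (PySem.List.pyGetD line (i + j) ' ')
                      == toLowerCharA (PySem.List.pyGetD sub j ' ')) := by
  induction js with
  | nil => rfl
  | cons j js ih =>
      by_cases h : toLowerCharA (PySem.List.pyGetD line (i + j) ' ')
                   = toLowerCharA (PySem.List.pyGetD sub j ' ') <;>
        simp [aInner, h, ih]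

theorem aOuter_eq_any (line sub : List Char) (is : List Int) :
    aOuter line sub is =
      is.any (fun i => aInner line sub i (PySem.List.pyRange 0 (sub.length : Int))) := by
  induction is with
  | nil => rfl
  | cons i is ih =>
      by_cases h : aInner line sub i (PySem.List.pyRange 0 (sub.length : Int)) = true <;>
        simp [aOuter, h, ih]

-- one position i of A's outer loop succeeds iff the lowered characters match there
theorem inner_iff_match (L S : List Char) (i : Nat) (hle : i + S.length ≤ L.length) :
    (aInner L S (i : Int) (PySem.List.pyRange 0 (S.length : Int)) = true) ↔
      ∀ (j : Nat) (hj : j < S.length),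
        PySem.Chars.lowerChar (L[i + j]'(by omega)) = PySem.Chars.lowerChar S[j] := by
  rw [aInner_eq_all,
    show ((S.length : Int)) = ((S.length : Nat) : Int) from rfl,
    PySem.List.pyRange_zero_natCast, List.all_eq_true]
  simp only [List.mem_map, List.mem_range]
  constructor
  · intro h j hj
    have := h (j : Int) ⟨j, hj, rfl⟩
    rw [beq_iff_eq,
        PySem.List.pyGetD_eq_getElem (h0 := by positivity) (h1 := by omega),
        PySem.List.pyGetD_eq_getElem (h0 := by positivity) (h1 := by exact_mod_cast hj)] at this
    simp only [toLowerCharA_eq] at this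
    have hN : ((i : Int) + (j : Int)).toNat = i + j := by omega
    have hM : ((j : Int)).toNat = j := by omega
    simpa [hN, hM] using this
  · rintro h x ⟨j, hj, rfl⟩
    rw [beq_iff_eq,
        PySem.List.pyGetD_eq_getElem (h0 := by positivity) (h1 := by omega),
        PySem.List.pyGetD_eq_getElem (h0 := by positivity) (h1 := by exact_mod_cast hj)]
    simp only [toLowerCharA_eq]
    have hN : ((i : Int) + (j : Int)).toNat = i + j := by omega
    have hM : ((j : Int)).toNat = j := by omega
    simpa [hN, hM] using h j hj

-- the lowered 'sub is a prefix of line dropped at i' unfolded to characters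
theorem prefix_iff_match (L S : List Char) (i : Nat) (hle : i + S.length ≤ L.length) :
    (S.map PySem.Chars.lowerChar <+: (L.map PySem.Chars.lowerChar).drop i) ↔
      ∀ (j : Nat) (hj : j < S.length),
        PySem.Chars.lowerChar (L[i + j]'(by omega)) = PySem.Chars.lowerChar S[j] := by
  rw [List.prefix_iff_getElem?]
  simp only [List.length_map, List.getElem?_drop, List.getElem?_map, List.getElem_map]
  constructor
  · intro h j hj
    have := h j hj
    rw [List.getElem?_eq_getElem (by omega)] at this
    simp only [Option.map_some, Option.some.injEq] at this
    exact this
  · intro h j hj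
    rw [List.getElem?_eq_getElem (by omega)]
    simp only [Option.map_some, Option.some.injEq]
    exact h j hj

-- ===== VERDICT (by name: the statement is the Claim_ definition above) =====
theorem contains_substring_spec : Claim_equal_contains_substring := by
  intro line sub _
  unfold Spec_contains_substring contains_substring contains_substring_alt
  rw [PySem.Str.isIn, PySem.Str.toList_lower, PySem.Str.toList_lower]
  rw [aOuter_eq_any, Bool.eq_iff_iff, List.any_eq_true]
  rw [← PySem.Chars.exists_prefix_drop_iff_isIn]
  simp only [PySem.Chars.lower]
  have hlen : PySem.Str.len line - PySem.Str.len sub + 1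
      = ((line.toList.length : Int) - (sub.toList.length : Int) + 1) := by
    simp [PySem.Str.len]
  rw [hlen]
  constructor
  · rintro ⟨i, hi, h⟩
    rw [PySem.List.mem_pyRange_one] at hi
    obtain ⟨hi0, hiu⟩ := hi
    have hle : i.toNat + sub.toList.length ≤ line.toList.length := by omega
    refine ⟨i.toNat, ?_⟩
    rw [prefix_iff_match _ _ _ hle, ← inner_iff_match _ _ _ hle]
    rwa [Int.toNat_of_nonneg hi0]
  · rintro ⟨j, h⟩
    by_cases hS : sub.toList = []
    · refine ⟨0, ?_, ?_⟩
      · rw [PySem.List.mem_pyRange_one]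
        have : sub.toList.length = 0 := by simp [hS]
        constructor
        · exact le_refl 0
        · rw [this]; push_cast; omega
      · rw [hS]
        simp [aInner, PySem.List.pyRange]
    · have hjlt : j < line.toList.length := by
        by_contra hge
        have : (line.toList.map PySem.Chars.lowerChar).drop j = [] := by
          apply List.drop_eq_nil_of_le; rw [List.length_map]; omega
        rw [this, List.prefix_nil, List.map_eq_nil_iff] at h
        exact hS h
      have hlenle := h.length_le
      simp only [List.length_map, List.length_drop] at hlenle
      have hle : j + sub.toList.length ≤ line.toList.length := by omega
      refine ⟨(j : Int), ?_, ?_⟩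
      · rw [PySem.List.mem_pyRange_one]
        constructor
        · positivity
        · omega
      · rw [inner_iff_match _ _ _ hle, ← prefix_iff_match _ _ _ hle]
        exact h
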